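-- pv_equiv track=rewrite | github.com/pypi-data/pypi-mirror-337 | packages/rHDPE-Data-Analysis/rHDPE_Data_Analysis-1.0.163.tar.gz/rHDPE_Data_Analysis-1.0.163/rHDPE_Data_Analysis/DSC_Analysis/Preprocessing.py | remove_files
-- ===== SOURCE A (Python) =====
-- def remove_files( file_data, data, descriptors_to_remove = "" ):
--     '''Remove files not needed/wanted for analysis by searching for letters in file descriptions.'''
--
--     files_to_remove = []
--
--     for i in range( len( file_data ) ):
--
--         s = file_data[i][3]
--
--         for l in descriptors_to_remove:
--
--             if s.find( l ) > -0.5: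
--
--                 files_to_remove.append( i )
--
--                 break
--
--     files_to_remove.reverse()
--
--     for r in files_to_remove:
--
--         file_data.pop( r )
--         data[1].pop( r )
--         data[3].pop( r )
--
--     return file_data, data
-- ===== SOURCE B (Python) =====
-- def remove_files(file_data, data, descriptors_to_remove=""):
--     '''Remove files not needed/wanted for analysis by searching for letters in file descriptions.'''
--
--     remove = {i for i, row in enumerate(file_data)
--               if any(l in row[3] for l in descriptors_to_remove)}
--
--     file_data[:] = [row for i, row in enumerate(file_data) if i not in remove]
--
--     if remove:
--         data[1][:] = [x for i, x in enumerate(data[1]) if i not in remove]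
--         data[3][:] = [x for i, x in enumerate(data[3]) if i not in remove]
--
--     return file_data, data
-- ===== Notes on version B (the rewrite author's own statement) =====
-- stated objective: simpler
-- what changed: Replaces A's break-loop index collection plus reverse-and-pop bookkeeping by computing the set of removal indices once and rebuilding file_data, data[1] and data[3] with a single enumerate keep-filter each (in-place via slice assignment).
import Mathlib
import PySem

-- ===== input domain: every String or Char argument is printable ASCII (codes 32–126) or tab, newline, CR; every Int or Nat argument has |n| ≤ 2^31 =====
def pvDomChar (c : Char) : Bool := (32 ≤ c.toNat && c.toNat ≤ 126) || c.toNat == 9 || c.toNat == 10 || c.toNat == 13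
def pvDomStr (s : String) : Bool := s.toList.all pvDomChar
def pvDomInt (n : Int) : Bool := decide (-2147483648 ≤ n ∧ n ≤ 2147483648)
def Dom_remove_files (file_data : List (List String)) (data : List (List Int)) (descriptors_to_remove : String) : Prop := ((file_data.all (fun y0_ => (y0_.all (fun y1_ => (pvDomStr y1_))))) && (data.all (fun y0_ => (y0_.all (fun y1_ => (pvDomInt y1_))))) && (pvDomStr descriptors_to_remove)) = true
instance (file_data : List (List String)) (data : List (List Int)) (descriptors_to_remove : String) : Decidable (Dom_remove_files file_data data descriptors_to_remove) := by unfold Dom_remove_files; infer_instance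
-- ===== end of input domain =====

-- B replaces A's reverse-and-pop index bookkeeping by a single keep-filter over each list
-- (objective: simpler). Both Pythons mutate file_data / data's sublists in place; the
-- equivalence proved here is about the RETURN value (the same final list contents).

-- ===== PORT A =====
-- inner 'for l in descriptors: if s.find(l) > -0.5: … break' — on an integer find result,
-- '> -0.5' is exactly '0 ≤ find'
def rfDesc (s : String) (ls : List Char) : Bool :=
  match ls with
  | [] => false
  | l :: rest => if 0 ≤ PySem.Str.find s (String.mk [l]) then true else rfDesc s rest

-- xs.pop(r) (result list; Pre_ keeps the index in range, out of range we keep xs)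
def rfPopD {α : Type} (xs : List α) (r : Int) : List α :=
  ((PySem.List.pop? xs r).map Prod.snd).getD xs

def remove_files (file_data : List (List String)) (data : List (List Int)) (descriptors_to_remove : String) : List (List String) × List (List Int) :=
  let files_to_remove : List Int :=
    (PySem.List.pyRange 0 file_data.length 1).foldl
      (fun acc i =>
        if rfDesc (PySem.List.pyGetD (PySem.List.pyGetD file_data i []) 3 "") descriptors_to_remove.toList
        then acc ++ [i] else acc) []
  let rs := files_to_remove.reverse
  let st := rs.foldl
    (fun st r => (rfPopD st.1 r, rfPopD st.2.1 r, rfPopD st.2.2 r))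
    (file_data, PySem.List.pyGetD data 1 [], PySem.List.pyGetD data 3 [])
  (st.1, PySem.List.pySetD (PySem.List.pySetD data 1 st.2.1) 3 st.2.2)

-- ===== PORT B =====
-- any(l in row[3] for l in descriptors_to_remove)
def rfHas (s : String) (ls : List Char) : Bool :=
  ls.any (fun l => PySem.Str.isIn (String.mk [l]) s)

-- [x for i, x in enumerate(xs) if i not in remove]
def rfKeep {α : Type} (xs : List α) (remove : PySem.Set Int) : List α :=
  (PySem.List.enumerate xs).filterMap
    (fun p => if PySem.Set.contains remove p.1 then none else some p.2)

def remove_files_alt (file_data : List (List String)) (data : List (List Int)) (descriptors_to_remove : String) : List (List String) × List (List Int) :=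
  let remove : PySem.Set Int :=
    PySem.Set.ofList ((PySem.List.enumerate file_data).filterMap
      (fun p => if rfHas (PySem.List.pyGetD p.2 3 "") descriptors_to_remove.toList then some p.1 else none))
  let fd' := rfKeep file_data remove
  if remove.isEmpty then (fd', data)
  else
    (fd', PySem.List.pySetD (PySem.List.pySetD data 1
            (rfKeep (PySem.List.pyGetD data 1 []) remove)) 3
            (rfKeep (PySem.List.pyGetD data 3 []) remove))

-- ===== PRECONDITION & SPEC =====
-- Pre_ excludes exactly the inputs on which A raises IndexError: a file row with no
-- index 3, or a removed index with data shorter than 4 entries or data[1]/data[3]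
-- too short to pop that index.
def Pre_remove_files (file_data : List (List String)) (data : List (List Int)) (descriptors_to_remove : String) : Prop :=
  (∀ row ∈ file_data, 4 ≤ row.length) ∧
  (∀ i : Nat, i < file_data.length →
    rfHas (PySem.List.pyGetD (PySem.List.pyGetD file_data (i : Int) []) 3 "") descriptors_to_remove.toList = true →
    4 ≤ data.length ∧ i < (PySem.List.pyGetD data 1 []).length ∧ i < (PySem.List.pyGetD data 3 []).length)
instance (file_data : List (List String)) (data : List (List Int)) (descriptors_to_remove : String) : Decidable (Pre_remove_files file_data data descriptors_to_remove) := by unfold Pre_remove_files; infer_instance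

def pvWitness_remove_files : List (List String) × List (List Int) × String :=
  ([["f1", "1", "2", "xa"], ["f2", "1", "2", "yb"]], [[9], [1, 2], [9], [3, 4]], "a")

def Spec_remove_files (file_data : List (List String)) (data : List (List Int)) (descriptors_to_remove : String) (out : List (List String) × List (List Int)) : Prop := out = remove_files_alt file_data data descriptors_to_remove
instance (file_data : List (List String)) (data : List (List Int)) (descriptors_to_remove : String) (out : List (List String) × List (List Int)) : Decidable (Spec_remove_files file_data data descriptors_to_remove out) := by unfold Spec_remove_files; infer_instance

-- ===== CLAIM (what is proved, stated in full; the proofs are below) =====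
def Claim_equal_remove_files : Prop := ∀ (file_data : List (List String)) (data : List (List Int)) (descriptors_to_remove : String), Dom_remove_files file_data data descriptors_to_remove → Pre_remove_files file_data data descriptors_to_remove → Spec_remove_files file_data data descriptors_to_remove (remove_files file_data data descriptors_to_remove)

-- ===== LEMMAS AND PROOFS =====

-- A's inner break-loop decides the same predicate as B's any(…)
theorem rfDesc_eq_rfHas (s : String) (ls : List Char) : rfDesc s ls = rfHas s ls := by
  induction ls with
  | nil => rfl
  | cons l rest ih =>
    have hiff : ((0 : Int) ≤ PySem.Str.find s (String.mk [l])) ↔ PySem.Str.isIn (String.mk [l]) s = true := by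
      have hle := PySem.Chars.neg_one_le_find s.toList (String.mk [l]).toList
      have hfind : PySem.Str.find s (String.mk [l]) = PySem.Chars.find s.toList (String.mk [l]).toList := rfl
      have hIn : PySem.Str.isIn (String.mk [l]) s = PySem.Chars.isIn (String.mk [l]).toList s.toList := rfl
      rw [hfind, hIn, PySem.Chars.isIn_iff_infix]
      constructor
      · intro h0
        by_contra hinf
        have := (PySem.Chars.find_eq_neg_one_iff s.toList (String.mk [l]).toList).mpr hinf
        omega
      · intro hinf
        have := (PySem.Chars.find_eq_neg_one_iff s.toList (String.mk [l]).toList).not.mpr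
          (by simp [hinf])
        omega
    by_cases h : (0 : Int) ≤ PySem.Str.find s (String.mk [l])
    · have hIn : PySem.Str.isIn (String.mk [l]) s = true := hiff.mp h
      simp only [rfDesc, if_pos h, rfHas, List.any_cons, hIn, Bool.true_or]
    · have hIn : PySem.Str.isIn (String.mk [l]) s = false := by
        rcases Bool.eq_false_or_eq_true (PySem.Str.isIn (String.mk [l]) s) with ht | hf
        · exact absurd (hiff.mpr ht) h
        · exact hf
      simp only [rfDesc, if_neg h, rfHas, List.any_cons, hIn, Bool.false_or]
      exact ih

-- the triple pop loop acts componentwise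
theorem foldl_pop_triple (rs : List Int) (a : List (List String)) (b c : List Int) :
    rs.foldl (fun st r => (rfPopD st.1 r, rfPopD st.2.1 r, rfPopD st.2.2 r)) (a, b, c)
      = (rs.foldl rfPopD a, rs.foldl rfPopD b, rs.foldl rfPopD c) := by
  induction rs generalizing a b c with
  | nil => rfl
  | cons r rs ih => simp [List.foldl_cons, ih]

-- keeping everything keeps the list
theorem keep_none {α : Type} (L : List α) (s : Int) (q : Int → Bool)
    (h : ∀ k : Nat, k < L.length → q (s + (k : Int)) = false) :
    (PySem.List.enumerate L s).filterMap (fun p => if q p.1 then none else some p.2) = L := by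
  have hcongr : ∀ p ∈ PySem.List.enumerate L s,
      (fun p : Int × α => if q p.1 then none else some p.2) p = some p.2 := by
    intro p hp
    rw [PySem.List.mem_enumerate_iff] at hp
    obtain ⟨k, hk, rfl⟩ := hp
    simp [h k hk]
  rw [List.filterMap_congr hcongr,
      show (fun p : Int × α => some p.2) = some ∘ (fun p : Int × α => p.2) from rfl,
      List.filterMap_eq_map]
  exact PySem.List.map_snd_enumerate L s

-- the core lemma: popping a strictly descending list of valid indices is an index filter
theorem popAll_eq_keep {α : Type} (D : List Nat) (hD : D.Pairwise (· > ·)) (L : List α)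
    (hlt : ∀ k ∈ D, k < L.length) :
    (D.map (fun k : Nat => (k : Int))).foldl rfPopD L
      = (PySem.List.enumerate L).filterMap
          (fun p => if D.any (fun k : Nat => (k : Int) == p.1) then none else some p.2) := by
  induction D generalizing L with
  | nil =>
    simpa using keep_none L 0 (fun _ => false) (by intro k hk; rfl)
  | cons m D' ih =>
    have hm : m < L.length := hlt m (by simp)
    have hD' : ∀ k ∈ D', k < m := by
      intro k hk; exact (List.pairwise_cons.mp hD).1 k hk
    -- the first pop removes index m
    have hpop : rfPopD L ((m : Int)) = L.eraseIdx m := by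
      unfold rfPopD
      rw [PySem.List.pop?_natCast L m hm]
      rfl
    simp only [List.map_cons, List.foldl_cons, hpop]
    rw [ih (List.pairwise_cons.mp hD).2 (L.eraseIdx m)
        (by intro k hk; have := hD' k hk; simp [List.length_eraseIdx, hm]; omega)]
    -- decompose L around index m
    obtain ⟨A, b, C, hA, hL⟩ : ∃ A b C, A.length = m ∧ L = A ++ b :: C := by
      refine ⟨L.take m, L[m], L.drop (m + 1), by simp [hm.le], ?_⟩
      conv_lhs => rw [← List.take_append_drop m L]
      congr 1
      rw [List.drop_eq_getElem_cons hm]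
    subst hL
    have herase : (A ++ b :: C).eraseIdx m = A ++ C := by
      rw [← hA, List.eraseIdx_append_of_length_le (le_refl _)]
      simp
    rw [herase]
    rw [PySem.List.enumerate_append, PySem.List.enumerate_append,
        List.filterMap_append, List.filterMap_append]
    congr 1
    · -- A part: membership in m :: D' equals membership in D' for indices < m
      apply List.filterMap_congr
      intro p hp
      rw [PySem.List.mem_enumerate_iff] at hp
      obtain ⟨k, hk, rfl⟩ := hp
      have hkm : k < m := by rw [hA] at hk; exact hk
      have : ((m : Int) == (0 + (k : Int))) = false := by simp; omega
      simp only [List.any_cons, this, Bool.false_or]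
    · -- C parts both keep everything
      rw [keep_none C ((0 : Int) + (A.length : Int))
            (fun x => D'.any (fun k : Nat => (k : Int) == x))
            (by intro k hk
                simp only [List.any_eq_false]
                intro x hx
                have := hD' x hx
                simp [hA]; omega)]
      rw [PySem.List.enumerate_cons, List.filterMap_cons]
      have hmm : (List.any (m :: D') fun k : Nat => (k : Int) == (0 + (A.length : Int))) = true := by
        simp [hA]
      simp only [hmm, if_pos]
      rw [keep_none C ((0 : Int) + (A.length : Int) + 1)
            (fun x => (m :: D').any (fun k : Nat => (k : Int) == x))
            (by intro k hk
                simp only [List.any_cons, List.any_eq_true, Bool.or_eq_false_iff, hA]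
                constructor
                · simp; omega
                · simp only [List.any_eq_false]
                  intro x hx
                  have := hD' x hx
                  simp; omega)]

-- map-into-Int of a Nat filter, as a filterMap
theorem filterMap_if_eq_map_filter (q : Nat → Bool) (l : List Nat) :
    l.filterMap (fun k => if q k then some ((k : Int)) else none)
      = (l.filter q).map (fun k : Nat => (k : Int)) := by
  induction l with
  | nil => rfl
  | cons a t ih =>
    rw [List.filterMap_cons, List.filter_cons]
    by_cases h : q a <;> simp [h, ih]

-- ===== VERDICT (by name: the statement is the Claim_ definition above) =====
theorem remove_files_spec : Claim_equal_remove_files := by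
  intro fd data descs hDom hPre
  unfold Spec_remove_files remove_files remove_files_alt
  dsimp only
  obtain ⟨hrow, hdat⟩ := hPre
  set ls := descs.toList with hls
  set q : Nat → Bool := fun k => rfHas (PySem.List.pyGetD (PySem.List.pyGetD fd (k : Int) []) 3 "") ls with hq
  set N : List Nat := (List.range fd.length).filter q with hN
  -- characterise A's files_to_remove
  have hA_list :
      (PySem.List.pyRange 0 fd.length 1).foldl
        (fun acc i => if rfDesc (PySem.List.pyGetD (PySem.List.pyGetD fd i []) 3 "") ls
                      then acc ++ [i] else acc) []
      = N.map (fun k : Nat => (k : Int)) := by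
    rw [PySem.List.pyRange_zero_natCast fd.length, List.foldl_map]
    have hfun : (fun (acc : List Int) (k : Nat) =>
          if rfDesc (PySem.List.pyGetD (PySem.List.pyGetD fd (k : Int) []) 3 "") ls
          then acc ++ [(k : Int)] else acc)
        = (fun acc k => if q k then acc ++ [(fun j : Nat => (j : Int)) k] else acc) := by
      funext acc k
      rw [rfDesc_eq_rfHas]
    rw [hfun, PySem.List.foldl_append_if q (fun k : Nat => (k : Int)) (List.range fd.length) [], hN]
    rw [List.nil_append]
  -- B's removal set is the same list (already without duplicates)
  have hNpair : N.Pairwise (· < ·) :=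
    List.Pairwise.sublist List.filter_sublist List.pairwise_lt_range
  have hNlt : ∀ k ∈ N, k < fd.length := by
    intro k hk
    exact List.mem_range.mp (List.mem_of_mem_filter hk)
  have hB_set :
      PySem.Set.ofList ((PySem.List.enumerate fd).filterMap
        (fun p => if rfHas (PySem.List.pyGetD p.2 3 "") ls then some p.1 else none))
      = N.map (fun k : Nat => (k : Int)) := by
    have h1 : (PySem.List.enumerate fd).filterMap
        (fun p => if rfHas (PySem.List.pyGetD p.2 3 "") ls then some p.1 else none)
        = N.map (fun k : Nat => (k : Int)) := by
      rw [PySem.List.enumerate_eq_map_pyRange fd [],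
          show PySem.List.pyRange 0 (PySem.List.len fd) 1 = PySem.List.pyRange 0 ((fd.length : Nat) : Int) 1 from rfl,
          PySem.List.pyRange_zero_natCast fd.length, List.map_map, List.filterMap_map]
      rw [show ((fun p : Int × List String => if rfHas (PySem.List.pyGetD p.2 3 "") ls then some p.1 else none)
            ∘ ((fun j => (j, PySem.List.pyGetD fd j [])) ∘ fun k : Nat => (k : Int)))
          = (fun k : Nat => if q k then some ((k : Int)) else none) from rfl]
      exact filterMap_if_eq_map_filter q (List.range fd.length)
    rw [h1]
    apply PySem.Set.ofList_eq_self_of_nodup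
    have : (N.map (fun k : Nat => (k : Int))).Pairwise (· < ·) := by
      apply List.Pairwise.map _ _ hNpair
      intro a b h
      exact_mod_cast h
    exact this.nodup.imp (by intro a b h; omega)
  rw [hA_list, hB_set]
  -- membership tests coincide
  have hmem : ∀ x : Int, PySem.Set.contains (N.map (fun k : Nat => (k : Int))) x
      = N.any (fun k : Nat => (k : Int) == x) := by
    intro x
    rw [PySem.Set.contains_eq_listContains, List.contains_eq_any_beq, List.any_map]
    simp only [Function.comp_def]
    congr 1
    funext k
    exact Bool.beq_comm
  have hkeep : ∀ {α : Type} (L : List α),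
      rfKeep L (N.map (fun k : Nat => (k : Int)))
      = (PySem.List.enumerate L).filterMap
          (fun p => if N.any (fun k : Nat => (k : Int) == p.1) then none else some p.2) := by
    intro α L
    unfold rfKeep
    apply List.filterMap_congr
    intro p _
    rw [hmem]
  rw [foldl_pop_triple]
  by_cases hNe : N = []
  · -- nothing to remove: A pops nothing and rewrites data[1]/data[3] with themselves
    rw [hNe]
    simp only [List.map_nil, List.foldl_nil, List.reverse_nil, List.isEmpty_nil, if_pos]
    have hset : ∀ (i : Int), 0 ≤ i →
        PySem.List.pySetD data i (PySem.List.pyGetD data i []) = data := by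
      intro i h0
      by_cases hi : i < (data.length : Int)
      · have hidx : PySem.List.pyIdx? data.length i = some i.toNat := by
          simp [PySem.List.pyIdx?, h0, hi]
        have hlt : i.toNat < data.length := by omega
        simp [PySem.List.pySetD, PySem.List.pySet?, PySem.List.pyGetD, PySem.List.pyGet?, hidx,
              List.getElem?_eq_getElem hlt]
      · simp [PySem.List.pySetD, PySem.List.pySet?, PySem.List.pyIdx?, h0, hi]
    rw [Prod.mk.injEq]
    refine ⟨?_, ?_⟩
    · show fd = rfKeep fd []
      rw [rfKeep]
      exact (keep_none fd 0 (fun x => PySem.Set.contains [] x) (fun k hk => rfl)).symm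
    · rw [hset 1 (by norm_num), hset 3 (by norm_num)]
  · -- at least one removal: Pre_ gives the bounds for data[1]/data[3]
    have hq_of_mem : ∀ k ∈ N, q k = true := fun k hk => List.of_mem_filter hk
    have hbounds : ∀ k ∈ N, k < (PySem.List.pyGetD data 1 []).length ∧ k < (PySem.List.pyGetD data 3 []).length := by
      intro k hk
      have h1 := hdat k (hNlt k hk) (hq_of_mem k hk)
      exact ⟨h1.2.1, h1.2.2⟩
    have hDpair : N.reverse.Pairwise (· > ·) := by
      rw [List.pairwise_reverse]
      exact hNpair
    have hiso : (N.map (fun k : Nat => (k : Int))).isEmpty = false := by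
      simp [List.isEmpty_eq_false_iff, hNe]
    rw [hiso]
    simp only [Bool.false_eq_true, if_false]
    have hpop : ∀ {α : Type} (L : List α), (∀ k ∈ N, k < L.length) →
        (N.map (fun k : Nat => (k : Int))).reverse.foldl rfPopD L
        = rfKeep L (N.map (fun k : Nat => (k : Int))) := by
      intro α L hL
      rw [← List.map_reverse,
          popAll_eq_keep N.reverse hDpair L (by intro k hk; exact hL k (List.mem_reverse.mp hk)),
          hkeep L]
      apply List.filterMap_congr
      intro p _
      congr 1
      simp [List.any_eq_true]
    rw [Prod.mk.injEq]
    refine ⟨?_, ?_⟩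
    · exact hpop fd hNlt
    · rw [hpop (PySem.List.pyGetD data 1 []) (fun k hk => (hbounds k hk).1),
          hpop (PySem.List.pyGetD data 3 []) (fun k hk => (hbounds k hk).2)]
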